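-- pv_equiv track=rewrite | github.com/viniciusdsandrade/neo-pi-r-score-indicators-with-python | src/scorer.py | compute_domain_scores
-- ===== SOURCE A (Python) =====
-- from typing import List, Dict
--
-- def compute_domain_scores(facet_scores: Dict[str, int]) -> Dict[str, int]:
--     domain_map = {
--         'Neuroticismo': [f for f in facet_scores if f.startswith('N')],
--         'Extroversão': [f for f in facet_scores if f.startswith('E')],
--         'Abertura': [f for f in facet_scores if f.startswith('O')],
--         'Amabilidade': [f for f in facet_scores if f.startswith('A')],
--         'Conscienciosidade': [f for f in facet_scores if f.startswith('C')],
--     }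
--     return {dom: sum(facet_scores[f] for f in facs) for dom, facs in domain_map.items()}
-- ===== SOURCE B (Python) =====
-- def compute_domain_scores(facet_scores):
--     n = e = o = a = c = 0
--     for facet, score in facet_scores.items():
--         if facet.startswith('N'):
--             n += score
--         elif facet.startswith('E'):
--             e += score
--         elif facet.startswith('O'):
--             o += score
--         elif facet.startswith('A'):
--             a += score
--         elif facet.startswith('C'):
--             c += score
--     return {
--         'Neuroticismo': n,
--         'Extroversão': e,
--         'Abertura': o,
--         'Amabilidade': a,
--         'Conscienciosidade': c,
--     }
-- ===== Notes on version B (the rewrite author's own statement) =====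
-- stated objective: alternative
-- what changed: Replaces A's five filter comprehensions over the keys plus a dict comprehension re-looking up each facet with one single pass over the items that adds each score into one of five running totals.
import Mathlib
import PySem

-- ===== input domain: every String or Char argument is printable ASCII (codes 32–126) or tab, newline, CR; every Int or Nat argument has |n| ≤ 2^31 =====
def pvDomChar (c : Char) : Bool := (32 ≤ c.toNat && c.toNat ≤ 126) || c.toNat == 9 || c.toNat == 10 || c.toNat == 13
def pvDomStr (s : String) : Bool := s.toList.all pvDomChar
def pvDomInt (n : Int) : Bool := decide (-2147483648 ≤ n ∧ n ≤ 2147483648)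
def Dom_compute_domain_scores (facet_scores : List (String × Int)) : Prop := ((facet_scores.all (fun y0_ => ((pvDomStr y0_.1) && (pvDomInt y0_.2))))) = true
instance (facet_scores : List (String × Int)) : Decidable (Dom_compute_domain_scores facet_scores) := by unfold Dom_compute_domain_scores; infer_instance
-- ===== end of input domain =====

-- B replaces A's five key-filtering comprehensions plus a dict comprehension that
-- re-looks every facet up with a single pass over the items keeping five running totals
-- (objective: alternative single-pass accumulation; return value only — neither version mutates its argument).

-- ===== PORT A =====
-- The Python parameter is a dict; this port reads the association list as dict(facet_scores).
def compute_domain_scores (facet_scores : List (String × Int)) : List (String × Int) :=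
  let d := PySem.Dict.ofList facet_scores
  -- domain_map: five filtered key lists, in A's order
  let facsN := d.keys.filter (fun f => PySem.Str.startswith f "N")
  let facsE := d.keys.filter (fun f => PySem.Str.startswith f "E")
  let facsO := d.keys.filter (fun f => PySem.Str.startswith f "O")
  let facsA := d.keys.filter (fun f => PySem.Str.startswith f "A")
  let facsC := d.keys.filter (fun f => PySem.Str.startswith f "C")
  -- facet_scores[f]: f is always a key of d here, so a default never fires (no KeyError)
  [("Neuroticismo", (facsN.map (fun f => d.getD f 0)).sum),
   ("Extroversão", (facsE.map (fun f => d.getD f 0)).sum),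
   ("Abertura", (facsO.map (fun f => d.getD f 0)).sum),
   ("Amabilidade", (facsA.map (fun f => d.getD f 0)).sum),
   ("Conscienciosidade", (facsC.map (fun f => d.getD f 0)).sum)]

-- ===== PORT B =====
-- one body of B's loop: add the score to the counter picked by the facet's prefix
def cdsStep (acc : Int × Int × Int × Int × Int) (p : String × Int) : Int × Int × Int × Int × Int :=
  let (n, e, o, a, c) := acc
  if PySem.Str.startswith p.1 "N" then (n + p.2, e, o, a, c)
  else if PySem.Str.startswith p.1 "E" then (n, e + p.2, o, a, c)
  else if PySem.Str.startswith p.1 "O" then (n, e, o + p.2, a, c)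
  else if PySem.Str.startswith p.1 "A" then (n, e, o, a + p.2, c)
  else if PySem.Str.startswith p.1 "C" then (n, e, o, a, c + p.2)
  else (n, e, o, a, c)

def compute_domain_scores_alt (facet_scores : List (String × Int)) : List (String × Int) :=
  let d := PySem.Dict.ofList facet_scores
  let r := d.items.foldl cdsStep (0, 0, 0, 0, 0)
  [("Neuroticismo", r.1), ("Extroversão", r.2.1), ("Abertura", r.2.2.1),
   ("Amabilidade", r.2.2.2.1), ("Conscienciosidade", r.2.2.2.2)]

-- ===== PRECONDITION & SPEC =====
def Spec_compute_domain_scores (facet_scores : List (String × Int)) (out : List (String × Int)) : Prop := out = compute_domain_scores_alt facet_scores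
instance (facet_scores : List (String × Int)) (out : List (String × Int)) : Decidable (Spec_compute_domain_scores facet_scores out) := by unfold Spec_compute_domain_scores; infer_instance

-- ===== CLAIM (what is proved, stated in full; the proofs are below) =====
def Claim_equal_compute_domain_scores : Prop := ∀ (facet_scores : List (String × Int)), Dom_compute_domain_scores facet_scores → Spec_compute_domain_scores facet_scores (compute_domain_scores facet_scores)

-- ===== LEMMAS AND PROOFS =====

-- sum of the scores of the items whose key starts with P
def sumP (P : String) (l : List (String × Int)) : Int :=
  ((l.filter (fun p => PySem.Str.startswith p.1 P)).map (·.2)).sum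

-- a string cannot start with two different characters
theorem sw_excl {cs : List Char} {c₁ c₂ : Char} (hne : c₁ ≠ c₂)
    (h : PySem.Chars.startswith cs [c₁] = true) :
    PySem.Chars.startswith cs [c₂] = false := by
  rw [PySem.Chars.startswith_iff] at h
  rcases h with ⟨t, ht⟩
  by_contra hc
  rw [Bool.not_eq_false, PySem.Chars.startswith_iff] at hc
  rcases hc with ⟨t', ht'⟩
  rw [← ht] at ht'
  simp only [List.cons_append, List.nil_append, List.cons_eq_cons] at ht'
  exact hne ht'.1.symm

theorem foldl_cdsStep (l : List (String × Int)) (n e o a c : Int) :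
    l.foldl cdsStep (n, e, o, a, c) =
      (n + sumP "N" l, e + sumP "E" l, o + sumP "O" l, a + sumP "A" l, c + sumP "C" l) := by
  induction l generalizing n e o a c with
  | nil => simp [sumP]
  | cons hd tl ih =>
    simp only [List.foldl_cons, cdsStep, PySem.Str.startswith_eq]
    by_cases h1 : PySem.Chars.startswith hd.1.toList ['N'] = true
    · have e2 := sw_excl (by decide : ('N' : Char) ≠ 'E') h1
      have e3 := sw_excl (by decide : ('N' : Char) ≠ 'O') h1
      have e4 := sw_excl (by decide : ('N' : Char) ≠ 'A') h1
      have e5 := sw_excl (by decide : ('N' : Char) ≠ 'C') h1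
      simp [h1, e2, e3, e4, e5, ih, sumP]
      omega
    · by_cases h2 : PySem.Chars.startswith hd.1.toList ['E'] = true
      · have e3 := sw_excl (by decide : ('E' : Char) ≠ 'O') h2
        have e4 := sw_excl (by decide : ('E' : Char) ≠ 'A') h2
        have e5 := sw_excl (by decide : ('E' : Char) ≠ 'C') h2
        simp [h1, h2, e3, e4, e5, ih, sumP]
        omega
      · by_cases h3 : PySem.Chars.startswith hd.1.toList ['O'] = true
        · have e4 := sw_excl (by decide : ('O' : Char) ≠ 'A') h3
          have e5 := sw_excl (by decide : ('O' : Char) ≠ 'C') h3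
          simp [h1, h2, h3, e4, e5, ih, sumP]
          omega
        · by_cases h4 : PySem.Chars.startswith hd.1.toList ['A'] = true
          · have e5 := sw_excl (by decide : ('A' : Char) ≠ 'C') h4
            simp [h1, h2, h3, h4, e5, ih, sumP]
            omega
          · by_cases h5 : PySem.Chars.startswith hd.1.toList ['C'] = true
            · simp [h1, h2, h3, h4, h5, ih, sumP]
              omega
            · simp [h1, h2, h3, h4, h5, ih, sumP]

-- A's per-domain sum over filtered keys equals sumP over the dict's items
theorem sumP_items (d : PySem.Dict String Int) (hnd : d.keys.Nodup) (P : String) :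
    sumP P d.items = ((d.keys.filter (fun f => PySem.Str.startswith f P)).map (fun f => d.getD f 0)).sum := by
  rw [PySem.Dict.items_eq_map_keys d hnd 0]
  unfold sumP
  rw [List.filter_map, List.map_map]
  rfl

-- ===== VERDICT (by name: the statement is the Claim_ definition above) =====
theorem compute_domain_scores_spec : Claim_equal_compute_domain_scores := by
  intro fs _
  unfold Spec_compute_domain_scores compute_domain_scores compute_domain_scores_alt
  have hnd := PySem.Dict.nodup_keys_ofList (ps := fs)
  dsimp only
  simp only [foldl_cdsStep, zero_add, sumP_items _ hnd]
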